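-- pv_equiv track=rewrite | github.com/alanmitchell/fnsb-benchmark | graph_util.py | color_formatter
-- ===== SOURCE A (Python) =====
-- def color_formatter(col_name_list):
--     """This function takes in a list of dataframe column names and then
--     converts them to standardized colors so that the final graphs show
--     each fuel type using the same color.
--     """
--     color_dict = {}
--
--     for col_name in col_name_list:
--         if 'natural' in col_name.lower():
--             color_dict[col_name] = '#1f78b4'
--         elif 'fuel' in col_name.lower():
--             color_dict[col_name] = '#e31a1c'
--         elif 'water' in col_name.lower():
--             color_dict[col_name] = '#b3df8a'
--         elif 'sewer' in col_name.lower():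
--             color_dict[col_name] = '#fdbf6f'
--         elif 'district' in col_name.lower():
--             color_dict[col_name] = '#fb9a99'
--         elif 'kw_' in col_name.lower() or 'demand' in col_name.lower():
--             color_dict[col_name] = '#33a02c'
--         elif 'electricity' in col_name.lower() or 'kwh' in col_name.lower() or 'Electricity' in col_name:
--             color_dict[col_name] = '#a6cee3'
--         elif 'refuse' in col_name.lower():
--             color_dict[col_name] = '#ff7f00'
--         elif 'propane' in col_name.lower():
--             color_dict[col_name] = '#cab2d6'
--         elif 'wood' in col_name.lower():
--             color_dict[col_name] = '#6a3d9a'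
--         else:
--             color_dict[col_name] = '#000000'
--
--     return color_dict
-- ===== SOURCE B (Python) =====
-- RULES = [
--     (('natural',), '#1f78b4'),
--     (('fuel',), '#e31a1c'),
--     (('water',), '#b3df8a'),
--     (('sewer',), '#fdbf6f'),
--     (('district',), '#fb9a99'),
--     (('kw_', 'demand'), '#33a02c'),
--     (('electricity', 'kwh'), '#a6cee3'),
--     (('refuse',), '#ff7f00'),
--     (('propane',), '#cab2d6'),
--     (('wood',), '#6a3d9a'),
-- ]
--
--
-- def color_formatter(col_name_list):
--     """Rule-major painting pass: start every column black, then walk the rule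
--     table back-to-front, overwriting the color of every matching column, so the
--     earliest rule's paint ends up on top (highest priority)."""
--     color_dict = {name: '#000000' for name in col_name_list}
--     for keywords, color in reversed(RULES):
--         for name in color_dict:
--             if any(kw in name.lower() for kw in keywords):
--                 color_dict[name] = color
--     return color_dict
-- ===== Notes on version B (the rewrite author's own statement) =====
-- stated objective: alternative
-- what changed: Instead of A's name-major elif cascade picking the first matching color per name, B paints rule-major and back-to-front: it initializes every name to black, then iterates the reversed keyword table and overwrites the color of every matching name, so the highest-priority rule is applied last and wins (the redundant case-sensitive 'Electricity' test is subsumed by the lowercase test).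
import Mathlib
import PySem

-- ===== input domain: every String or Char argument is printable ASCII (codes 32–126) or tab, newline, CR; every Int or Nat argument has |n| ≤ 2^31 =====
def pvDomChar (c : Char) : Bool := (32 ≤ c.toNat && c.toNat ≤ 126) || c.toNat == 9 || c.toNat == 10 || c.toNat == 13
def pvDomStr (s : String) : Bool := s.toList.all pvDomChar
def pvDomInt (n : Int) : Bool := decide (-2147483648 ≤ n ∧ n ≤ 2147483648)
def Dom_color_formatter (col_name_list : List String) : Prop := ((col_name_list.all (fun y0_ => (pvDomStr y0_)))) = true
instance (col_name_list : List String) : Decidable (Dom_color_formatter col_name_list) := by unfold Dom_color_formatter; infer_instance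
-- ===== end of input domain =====

-- B replaces A's name-major elif cascade by a rule-major back-to-front painting pass
-- over a keyword table (alternative decomposition; same cost).

-- ===== PORT A =====
-- literal transliteration of A's elif chain inside a foldl building the dict
def color_formatter (col_name_list : List String) : List (String × String) :=
  (col_name_list.foldl (fun color_dict col_name =>
    if PySem.Str.isIn "natural" (PySem.Str.lower col_name) then
      color_dict.insert col_name "#1f78b4"
    else if PySem.Str.isIn "fuel" (PySem.Str.lower col_name) then
      color_dict.insert col_name "#e31a1c"
    else if PySem.Str.isIn "water" (PySem.Str.lower col_name) then
      color_dict.insert col_name "#b3df8a"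
    else if PySem.Str.isIn "sewer" (PySem.Str.lower col_name) then
      color_dict.insert col_name "#fdbf6f"
    else if PySem.Str.isIn "district" (PySem.Str.lower col_name) then
      color_dict.insert col_name "#fb9a99"
    else if PySem.Str.isIn "kw_" (PySem.Str.lower col_name) || PySem.Str.isIn "demand" (PySem.Str.lower col_name) then
      color_dict.insert col_name "#33a02c"
    else if PySem.Str.isIn "electricity" (PySem.Str.lower col_name) || PySem.Str.isIn "kwh" (PySem.Str.lower col_name) || PySem.Str.isIn "Electricity" col_name then
      color_dict.insert col_name "#a6cee3"
    else if PySem.Str.isIn "refuse" (PySem.Str.lower col_name) then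
      color_dict.insert col_name "#ff7f00"
    else if PySem.Str.isIn "propane" (PySem.Str.lower col_name) then
      color_dict.insert col_name "#cab2d6"
    else if PySem.Str.isIn "wood" (PySem.Str.lower col_name) then
      color_dict.insert col_name "#6a3d9a"
    else
      color_dict.insert col_name "#000000") PySem.Dict.empty).items

-- ===== PORT B =====
-- the ordered rule table (RULES in Source B)
def pvRules : List (List String × String) :=
  [ (["natural"], "#1f78b4")
  , (["fuel"], "#e31a1c")
  , (["water"], "#b3df8a")
  , (["sewer"], "#fdbf6f")
  , (["district"], "#fb9a99")
  , (["kw_", "demand"], "#33a02c")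
  , (["electricity", "kwh"], "#a6cee3")
  , (["refuse"], "#ff7f00")
  , (["propane"], "#cab2d6")
  , (["wood"], "#6a3d9a") ]

-- Source B: all names start black, then each rule of reversed(RULES) repaints the matching names
def color_formatter_alt (col_name_list : List String) : List (String × String) :=
  (pvRules.reverse.foldl (fun color_dict r =>
      color_dict.keys.foldl (fun color_dict name =>
        if r.1.any (fun kw => PySem.Str.isIn kw (PySem.Str.lower name)) then
          color_dict.insert name r.2
        else
          color_dict) color_dict)
    (col_name_list.foldl (fun color_dict name => color_dict.insert name "#000000")
      PySem.Dict.empty)).items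

-- ===== PRECONDITION & SPEC =====
def Spec_color_formatter (col_name_list : List String) (out : List (String × String)) : Prop := out = color_formatter_alt col_name_list
instance (col_name_list : List String) (out : List (String × String)) : Decidable (Spec_color_formatter col_name_list out) := by unfold Spec_color_formatter; infer_instance

-- ===== CLAIM (what is proved, stated in full; the proofs are below) =====
def Claim_equal_color_formatter : Prop := ∀ (col_name_list : List String), Dom_color_formatter col_name_list → Spec_color_formatter col_name_list (color_formatter col_name_list)

-- ===== LEMMAS AND PROOFS =====

-- whether a rule matches the (lowercased) name
def pvMatch (name : String) (r : List String × String) : Bool :=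
  r.1.any (fun kw => PySem.Str.isIn kw (PySem.Str.lower name))

-- A's elif chain as a function of the name
def pvChain (col : String) : String :=
  if PySem.Str.isIn "natural" (PySem.Str.lower col) then "#1f78b4"
  else if PySem.Str.isIn "fuel" (PySem.Str.lower col) then "#e31a1c"
  else if PySem.Str.isIn "water" (PySem.Str.lower col) then "#b3df8a"
  else if PySem.Str.isIn "sewer" (PySem.Str.lower col) then "#fdbf6f"
  else if PySem.Str.isIn "district" (PySem.Str.lower col) then "#fb9a99"
  else if PySem.Str.isIn "kw_" (PySem.Str.lower col) || PySem.Str.isIn "demand" (PySem.Str.lower col) then "#33a02c"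
  else if PySem.Str.isIn "electricity" (PySem.Str.lower col) || PySem.Str.isIn "kwh" (PySem.Str.lower col) || PySem.Str.isIn "Electricity" col then "#a6cee3"
  else if PySem.Str.isIn "refuse" (PySem.Str.lower col) then "#ff7f00"
  else if PySem.Str.isIn "propane" (PySem.Str.lower col) then "#cab2d6"
  else if PySem.Str.isIn "wood" (PySem.Str.lower col) then "#6a3d9a"
  else "#000000"

-- first matching rule's color, else black (priority reading of the table)
def pvPick (name : String) : List (List String × String) → String
  | [] => "#000000"
  | r :: rest => if pvMatch name r then r.2 else pvPick name rest

-- `'Electricity' in col` implies `'electricity' in col.lower()` (lower is a char map).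
theorem pv_isIn_electricity_lower (col : String)
    (h : PySem.Str.isIn "Electricity" col = true) :
    PySem.Str.isIn "electricity" (PySem.Str.lower col) = true := by
  rw [PySem.Str.isIn_iff_infix] at *
  rw [PySem.Str.toList_lower]
  have : PySem.Chars.lower "Electricity".toList <:+: PySem.Chars.lower col.toList :=
    List.IsInfix.map _ h
  simpa using this

-- the elif chain picks exactly the first matching rule of the table
theorem pv_chain_eq_pick (col : String) : pvChain col = pvPick col pvRules := by
  simp only [pvChain, pvRules, pvPick, pvMatch, List.any_cons, List.any_nil, Bool.or_false]
  by_cases hE : PySem.Str.isIn "Electricity" col = true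
  · rw [pv_isIn_electricity_lower col hE]
    simp only [Bool.true_or]
  · simp only [Bool.not_eq_true] at hE
    rw [hE]
    simp only [Bool.or_false]

-- folding `insert n (f n)` sets each visited key to f of that key
theorem pv_getD_foldl_insert_fun (f : String → String) (xs : List String)
    (d : PySem.Dict String String) (k : String) :
    (xs.foldl (fun d n => d.insert n (f n)) d).getD k "" =
      if k ∈ xs then f k else d.getD k "" := by
  induction xs generalizing d with
  | nil => simp
  | cons n rest ih =>
      simp only [List.foldl_cons, ih, List.mem_cons]
      by_cases hk : k ∈ rest
      · simp [hk]
      · by_cases he : k = n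
        · subst he; simp [hk, PySem.Dict.getD_insert_self]
        · simp [hk, he, PySem.Dict.getD_insert_of_ne _ _ _ he]

-- one painting pass over a key list: a matching visited key gets the color, the rest keep theirs
theorem pv_pass_getD (r : List String × String) (l : List String)
    (d : PySem.Dict String String) (k : String) :
    (l.foldl (fun d n => if pvMatch n r then d.insert n r.2 else d) d).getD k "" =
      if k ∈ l ∧ pvMatch k r then r.2 else d.getD k "" := by
  induction l generalizing d with
  | nil => simp
  | cons n rest ih =>
      simp only [List.foldl_cons, ih, List.mem_cons]
      by_cases hk : k ∈ rest ∧ pvMatch k r = true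
      · simp [hk.1, hk.2]
      · by_cases he : k = n
        · subst he
          by_cases hm : pvMatch k r = true
          · simp [hm, PySem.Dict.getD_insert_self]
          · simp [hm]
        · by_cases hm : pvMatch n r = true
          · simp only [hm, if_true, PySem.Dict.getD_insert_of_ne _ _ _ he]
            simp only [not_and] at hk
            by_cases hkr : k ∈ rest
            · simp [hkr, hk hkr]
            · simp [hkr, he]
          · simp only [hm]
            simp only [not_and] at hk
            by_cases hkr : k ∈ rest
            · simp [hkr, hk hkr]
            · simp [hkr, he]

-- one painting pass preserves the key list when every visited key is already present
theorem pv_pass_keys (r : List String × String) (l : List String)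
    (d : PySem.Dict String String) (hl : ∀ n ∈ l, d.contains n = true) :
    (l.foldl (fun d n => if pvMatch n r then d.insert n r.2 else d) d).keys = d.keys := by
  induction l generalizing d with
  | nil => rfl
  | cons n rest ih =>
      simp only [List.foldl_cons]
      by_cases hm : pvMatch n r = true
      · simp only [hm, if_true]
        have hc : d.contains n = true := hl n (List.mem_cons_self ..)
        rw [ih (d.insert n r.2) (fun m hm' => by
              rw [PySem.Dict.contains_insert]
              simp [hl m (List.mem_cons_of_mem _ hm')]),
            PySem.Dict.keys_insert_of_contains _ _ hc]
      · simp only [hm]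
        exact ih d (fun m hm' => hl m (List.mem_cons_of_mem _ hm'))

-- the whole back-to-front pass: keys unchanged …
theorem pv_passAll_keys (rs : List (List String × String)) (d : PySem.Dict String String) :
    (rs.foldl (fun d r =>
        d.keys.foldl (fun d n => if pvMatch n r then d.insert n r.2 else d) d) d).keys
      = d.keys := by
  induction rs generalizing d with
  | nil => rfl
  | cons r rest ih =>
      simp only [List.foldl_cons]
      rw [ih, pv_pass_keys r d.keys d
        (fun n hn => (PySem.Dict.contains_iff_mem_keys d n).2 hn)]

-- … and each present key's value folds the rules over its old value
theorem pv_passAll_getD (rs : List (List String × String)) (d : PySem.Dict String String)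
    (k : String) (hk : k ∈ d.keys) :
    (rs.foldl (fun d r =>
        d.keys.foldl (fun d n => if pvMatch n r then d.insert n r.2 else d) d) d).getD k ""
      = rs.foldl (fun v r => if pvMatch k r then r.2 else v) (d.getD k "") := by
  induction rs generalizing d with
  | nil => rfl
  | cons r rest ih =>
      simp only [List.foldl_cons]
      have hkeys : (d.keys.foldl (fun d n => if pvMatch n r then d.insert n r.2 else d) d).keys = d.keys :=
        pv_pass_keys r d.keys d (fun n hn => (PySem.Dict.contains_iff_mem_keys d n).2 hn)
      rw [ih _ (by rw [hkeys]; exact hk), pv_pass_getD r d.keys d k]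
      simp [hk]

-- painting the reversed table over black equals the first-match priority reading
theorem pv_revfold_eq_pick (k : String) (rs : List (List String × String)) :
    rs.reverse.foldl (fun v r => if pvMatch k r then r.2 else v) "#000000" = pvPick k rs := by
  induction rs with
  | nil => rfl
  | cons r rest ih =>
      simp only [List.reverse_cons, List.foldl_append, List.foldl_cons, List.foldl_nil, ih, pvPick]

-- the if-branch fold of A, rewritten with insert factored out of the branches
theorem pv_A_fold (xs : List String) (d : PySem.Dict String String) :
    xs.foldl (fun color_dict col_name =>
      if PySem.Str.isIn "natural" (PySem.Str.lower col_name) then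
        color_dict.insert col_name "#1f78b4"
      else if PySem.Str.isIn "fuel" (PySem.Str.lower col_name) then
        color_dict.insert col_name "#e31a1c"
      else if PySem.Str.isIn "water" (PySem.Str.lower col_name) then
        color_dict.insert col_name "#b3df8a"
      else if PySem.Str.isIn "sewer" (PySem.Str.lower col_name) then
        color_dict.insert col_name "#fdbf6f"
      else if PySem.Str.isIn "district" (PySem.Str.lower col_name) then
        color_dict.insert col_name "#fb9a99"
      else if PySem.Str.isIn "kw_" (PySem.Str.lower col_name) || PySem.Str.isIn "demand" (PySem.Str.lower col_name) then
        color_dict.insert col_name "#33a02c"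
      else if PySem.Str.isIn "electricity" (PySem.Str.lower col_name) || PySem.Str.isIn "kwh" (PySem.Str.lower col_name) || PySem.Str.isIn "Electricity" col_name then
        color_dict.insert col_name "#a6cee3"
      else if PySem.Str.isIn "refuse" (PySem.Str.lower col_name) then
        color_dict.insert col_name "#ff7f00"
      else if PySem.Str.isIn "propane" (PySem.Str.lower col_name) then
        color_dict.insert col_name "#cab2d6"
      else if PySem.Str.isIn "wood" (PySem.Str.lower col_name) then
        color_dict.insert col_name "#6a3d9a"
      else
        color_dict.insert col_name "#000000") d
    = xs.foldl (fun color_dict col_name => color_dict.insert col_name (pvChain col_name)) d := by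
  apply PySem.List.foldl_congr_mem
  intro d col _
  simp only [pvChain, apply_ite (d.insert col)]

-- ===== VERDICT (by name: the statement is the Claim_ definition above) =====
theorem color_formatter_spec : Claim_equal_color_formatter := by
  intro xs _
  unfold Spec_color_formatter color_formatter color_formatter_alt
  rw [pv_A_fold]
  show _ = (pvRules.reverse.foldl (fun d r =>
      d.keys.foldl (fun d n => if pvMatch n r then d.insert n r.2 else d) d)
    (xs.foldl (fun d n => d.insert n "#000000") PySem.Dict.empty)).items
  set dA := xs.foldl (fun d n => d.insert n (pvChain n)) PySem.Dict.empty with hdA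
  set d0 := xs.foldl (fun d n => d.insert n "#000000") PySem.Dict.empty with hd0
  have hkA : dA.keys = PySem.Set.ofList xs := by
    rw [hdA, PySem.Dict.keys_foldl_insert]
    simp [PySem.Set.update_nil_left]
  have hk0 : d0.keys = PySem.Set.ofList xs := by
    rw [hd0, PySem.Dict.keys_foldl_insert]
    simp [PySem.Set.update_nil_left]
  have hndA : dA.keys.Nodup := by
    rw [hkA]; exact PySem.Set.nodup_ofList xs
  set dB := pvRules.reverse.foldl (fun d r =>
      d.keys.foldl (fun d n => if pvMatch n r then d.insert n r.2 else d) d) d0 with hdB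
  have hkB : dB.keys = PySem.Set.ofList xs := by
    rw [hdB, pv_passAll_keys, hk0]
  have hndB : dB.keys.Nodup := by
    rw [hkB]; exact PySem.Set.nodup_ofList xs
  rw [PySem.Dict.items_eq_map_keys dA hndA "", PySem.Dict.items_eq_map_keys dB hndB "",
      hkA, hkB]
  apply List.map_congr_left
  intro k hk
  have hkx : k ∈ xs := (PySem.Set.mem_ofList xs k).1 hk
  have hA : dA.getD k "" = pvChain k := by
    rw [hdA, pv_getD_foldl_insert_fun]; simp [hkx]
  have hB : dB.getD k "" = pvPick k pvRules := by
    rw [hdB, pv_passAll_getD _ _ _ (by rw [hk0]; exact hk)]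
    have h0 : d0.getD k "" = "#000000" := by
      rw [hd0, pv_getD_foldl_insert_fun]; simp [hkx]
    rw [h0, pv_revfold_eq_pick]
  rw [hA, hB, pv_chain_eq_pick]
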